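-- pv_equiv track=rewrite | github.com/juanauli/Inversion-Sequences-Consecutive-Patterns-of-Relations | count_consec_ineq3.py | count_eq_eq
-- ===== SOURCE A (Python) =====
-- def count_eq_eq(sequence):
--     index = 0
--     counter = 0
--     while index < len(sequence) - 2:
--         if sequence[index] == sequence[index + 1] == sequence[index + 2]:
--             counter += 1
--         index += 1
--     return counter
-- ===== SOURCE B (Python) =====
-- def count_eq_eq(sequence):
--     # One pass over maximal runs of equal elements: a run of length L
--     # contains exactly max(0, L - 2) windows of three equal consecutive elements.
--     total = 0
--     run = 0
--     prev = None
--     for x in sequence: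
--         if run != 0 and x == prev:
--             run += 1
--         else:
--             total += max(0, run - 2)
--             run = 1
--             prev = x
--     total += max(0, run - 2)
--     return total
-- ===== Notes on version B (the rewrite author's own statement) =====
-- stated objective: alternative
-- what changed: Replaced the sliding-triple index scan with a single pass over maximal runs of equal elements, adding the closed form max(0, L-2) per run.
import Mathlib
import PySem

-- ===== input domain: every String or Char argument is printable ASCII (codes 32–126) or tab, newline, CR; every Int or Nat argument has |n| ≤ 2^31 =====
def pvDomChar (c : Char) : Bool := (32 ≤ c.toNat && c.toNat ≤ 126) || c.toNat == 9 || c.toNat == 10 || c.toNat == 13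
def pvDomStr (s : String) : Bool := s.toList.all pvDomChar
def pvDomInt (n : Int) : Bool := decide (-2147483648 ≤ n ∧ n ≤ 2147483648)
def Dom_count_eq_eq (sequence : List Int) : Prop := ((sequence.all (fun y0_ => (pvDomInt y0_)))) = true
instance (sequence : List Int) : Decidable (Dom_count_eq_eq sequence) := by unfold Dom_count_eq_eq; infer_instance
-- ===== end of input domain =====

-- B replaces A's sliding-triple index scan by a single pass over maximal runs of
-- equal elements, adding the closed form max(0, L-2) per run (alternative, same cost).

-- ===== PORT A =====
-- the while loop of A: state (index, counter)
def countLoopA (sequence : List Int) (index counter : Int) : Int :=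
  if h : index < (sequence.length : Int) - 2 then
    countLoopA sequence (index + 1)
      (if PySem.List.pyGetD sequence index 0 = PySem.List.pyGetD sequence (index + 1) 0 ∧
          PySem.List.pyGetD sequence (index + 1) 0 = PySem.List.pyGetD sequence (index + 2) 0
       then counter + 1 else counter)
  else counter
termination_by ((sequence.length : Int) - 2 - index).toNat
decreasing_by omega

def count_eq_eq (sequence : List Int) : Int := countLoopA sequence 0 0

-- ===== PORT B =====
-- the for loop of Source B: state (total, run, prev); Python's initial prev = None is
-- never compared (guarded by run != 0), so it is represented by 0 here.
def countLoopB (rest : List Int) (total run prev : Int) : Int :=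
  match rest with
  | [] => total + max 0 (run - 2)
  | x :: rest =>
    if run ≠ 0 ∧ x = prev then countLoopB rest total (run + 1) prev
    else countLoopB rest (total + max 0 (run - 2)) 1 x

def count_eq_eq_alt (sequence : List Int) : Int := countLoopB sequence 0 0 0

-- ===== PRECONDITION & SPEC =====
def Spec_count_eq_eq (sequence : List Int) (out : Int) : Prop := out = count_eq_eq_alt sequence
instance (sequence : List Int) (out : Int) : Decidable (Spec_count_eq_eq sequence out) := by unfold Spec_count_eq_eq; infer_instance

-- ===== CLAIM (what is proved, stated in full; the proofs are below) =====
def Claim_equal_count_eq_eq : Prop := ∀ (sequence : List Int), Dom_count_eq_eq sequence → Spec_count_eq_eq sequence (count_eq_eq sequence)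

-- ===== LEMMAS AND PROOFS =====

-- canonical triple-window count, structural
def trip : List Int → Int
  | a :: b :: c :: t => (if a = b ∧ b = c then 1 else 0) + trip (b :: c :: t)
  | _ => 0

theorem trip_short {l : List Int} (h : l.length < 3) : trip l = 0 := by
  match l with
  | [] => rfl
  | [_] => rfl
  | [_, _] => rfl
  | _ :: _ :: _ :: _ => simp at h; omega

theorem loopA_eq (sequence : List Int) (index counter : Int) (h0 : 0 ≤ index) :
    countLoopA sequence index counter = counter + trip (sequence.drop index.toNat) := by
  rw [countLoopA]
  split
  · next h =>
    have hi : index.toNat < sequence.length := by omega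
    have hi1 : index.toNat + 1 < sequence.length := by omega
    have hi2 : index.toNat + 2 < sequence.length := by omega
    have e0 : PySem.List.pyGetD sequence index 0 = sequence[index.toNat] := by
      rw [PySem.List.pyGetD_eq_getElem sequence 0 h0 (by omega)]
    have e1 : PySem.List.pyGetD sequence (index + 1) 0 = sequence[index.toNat + 1] := by
      rw [PySem.List.pyGetD_eq_getElem sequence 0 (by omega) (by omega)]
      congr 1; omega
    have e2 : PySem.List.pyGetD sequence (index + 2) 0 = sequence[index.toNat + 2] := by
      rw [PySem.List.pyGetD_eq_getElem sequence 0 (by omega) (by omega)]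
      congr 1; omega
    have hd : sequence.drop index.toNat
        = sequence[index.toNat] :: sequence[index.toNat + 1] :: sequence[index.toNat + 2]
            :: sequence.drop (index.toNat + 3) := by
      rw [List.drop_eq_getElem_cons hi, List.drop_eq_getElem_cons hi1,
          List.drop_eq_getElem_cons hi2]
    have hd1 : sequence.drop (index + 1).toNat
        = sequence[index.toNat + 1] :: sequence[index.toNat + 2]
            :: sequence.drop (index.toNat + 3) := by
      have : (index + 1).toNat = index.toNat + 1 := by omega
      rw [this, List.drop_eq_getElem_cons hi1, List.drop_eq_getElem_cons hi2]
    rw [loopA_eq sequence (index + 1) _ (by omega), hd, hd1, trip, e0, e1, e2]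
    split <;> ring
  · next h =>
    have : (sequence.drop index.toNat).length < 3 := by
      simp only [List.length_drop]; omega
    rw [trip_short this]; ring
termination_by ((sequence.length : Int) - 2 - index).toNat
decreasing_by omega

-- a maximal run of n equal elements prepended to l (whose head differs, or l empty)
-- contributes exactly max 0 (n-2) triples
theorem trip_replicate (n : Nat) (p : Int) (l : List Int)
    (hl : l = [] ∨ l.head? ≠ some p) :
    trip (List.replicate n p ++ l) = max 0 ((n : Int) - 2) + trip l := by
  have hpx : ∀ x (t : List Int), l = x :: t → ¬ p = x := by
    intro x t he e
    rcases hl with h | h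
    · simp [he] at h
    · subst he; exact h (by simp [e.symm])
  match n with
  | 0 => simp
  | 1 =>
    match l with
    | [] => simp [trip]
    | [x] => simp [trip]
    | x :: y :: t =>
      have h1 : ¬ (p = x ∧ x = y) := fun ⟨e, _⟩ => hpx x _ rfl e
      simp only [List.replicate, List.cons_append, List.nil_append, trip]
      simp [h1]
  | Nat.succ (Nat.succ m) =>
    have step : List.replicate (m + 2) p ++ l
        = p :: p :: (List.replicate m p ++ l) := by
      simp [List.replicate]
    match m with
    | 0 =>
      match l with
      | [] => simp [trip]
      | [x] =>
        have h1 : ¬ (p = p ∧ p = x) := fun ⟨_, e⟩ => hpx x _ rfl e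
        simp [trip, hpx x [] rfl]
      | x :: y :: t =>
        have h1 : ¬ (p = p ∧ p = x) := fun ⟨_, e⟩ => hpx x _ rfl e
        have h2 : ¬ (p = x ∧ x = y) := fun ⟨e, _⟩ => hpx x _ rfl e
        simp [trip, hpx x _ rfl]
    | Nat.succ k =>
      have step2 : List.replicate (k + 1) p ++ l = p :: (List.replicate k p ++ l) := by
        simp [List.replicate]
      have ih := trip_replicate (k + 2) p l hl
      rw [step, step2, trip]
      have e3 : List.replicate (k + 2) p ++ l = p :: p :: (List.replicate k p ++ l) := by
        simp [List.replicate]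
      rw [e3] at ih
      rw [ih]
      simp only [and_self, if_pos]
      push_cast; omega

theorem loopB_eq (rest : List Int) (total : Int) (n : Nat) (prev : Int) :
    countLoopB rest total (n : Int) prev = total + trip (List.replicate n prev ++ rest) := by
  induction rest generalizing total n prev with
  | nil =>
    rw [countLoopB, trip_replicate n prev [] (Or.inl rfl)]
    simp [trip]
  | cons x t ih =>
    rw [countLoopB]
    split
    · next h =>
      obtain ⟨hn, hx⟩ := h
      have hrep : List.replicate n prev ++ x :: t = List.replicate (n + 1) prev ++ t := by
        subst hx
        rw [List.replicate_succ']
        simp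
      have : ((n : Int) + 1) = ((n + 1 : Nat) : Int) := by push_cast; ring
      rw [this, ih, hrep]
    · next h =>
      have hcond : x :: t = [] ∨ (x :: t).head? ≠ some prev ∨ n = 0 := by
        by_cases hx : x = prev
        · right; right
          by_contra hn
          exact h ⟨by exact_mod_cast hn, hx⟩
        · right; left; simp [hx]
      have : (1 : Int) = ((1 : Nat) : Int) := rfl
      rw [this, ih]
      rcases hcond with h' | h' | h'
      · simp at h'
      · rw [trip_replicate n prev (x :: t) (Or.inr h')]
        simp [List.replicate]; ring
      · subst h'; simp [List.replicate]

-- ===== VERDICT (by name: the statement is the Claim_ definition above) =====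
theorem count_eq_eq_spec : Claim_equal_count_eq_eq := by
  intro sequence _
  unfold Spec_count_eq_eq count_eq_eq count_eq_eq_alt
  rw [loopA_eq sequence 0 0 le_rfl]
  have := loopB_eq sequence 0 0 0
  simp at this ⊢
  omega
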